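-- pv_equiv track=rewrite | github.com/pypi-data/pypi-mirror-374 | packages/zx-rpa/zx_rpa-1.0.6.tar.gz/zx_rpa-1.0.6/zx_rpa/apis/crmeb/unified_converter.py | _analyze_spec_columns
-- ===== SOURCE A (Python) =====
-- from typing import Dict, List, Any, Optional
--
-- def _analyze_spec_columns(skus: List[Dict[str, Any]]) -> List[str]:
--     """分析规格维度"""
--     # 排除非规格字段
--     non_spec_fields = {
--         'code', 'price', 'stock', 'cost', 'ot_price', 'pic',
--         'weight', 'volume', 'brokerage', 'brokerage_two', 'vip_price'
--     }
--
--     spec_columns = set()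
--     for sku in skus:
--         for key in sku.keys():
--             if key not in non_spec_fields:
--                 spec_columns.add(key)
--
--     return sorted(list(spec_columns))  # 排序保证一致性
-- ===== SOURCE B (Python) =====
-- from typing import Dict, List, Any
--
-- def _analyze_spec_columns(skus: List[Dict[str, Any]]) -> List[str]:
--     non_spec_fields = {
--         'code', 'price', 'stock', 'cost', 'ot_price', 'pic',
--         'weight', 'volume', 'brokerage', 'brokerage_two', 'vip_price'
--     }
--     # sort-then-scan: sort all keys (with duplicates), then one pass that
--     # drops excluded keys and adjacent duplicates -- no set accumulator needed
--     keys = sorted(k for sku in skus for k in sku)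
--     out: List[str] = []
--     for k in keys:
--         if k not in non_spec_fields and (not out or out[-1] != k):
--             out.append(k)
--     return out
-- ===== Notes on version B (the rewrite author's own statement) =====
-- stated objective: alternative
-- what changed: Replaces A's set accumulator built by a nested loop (then sorted) with a sort-then-scan algorithm: sort the concatenated key list with duplicates, then a single linear pass that skips excluded keys and adjacent duplicates, so uniqueness comes from sortedness instead of a hash set.
import Mathlib
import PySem

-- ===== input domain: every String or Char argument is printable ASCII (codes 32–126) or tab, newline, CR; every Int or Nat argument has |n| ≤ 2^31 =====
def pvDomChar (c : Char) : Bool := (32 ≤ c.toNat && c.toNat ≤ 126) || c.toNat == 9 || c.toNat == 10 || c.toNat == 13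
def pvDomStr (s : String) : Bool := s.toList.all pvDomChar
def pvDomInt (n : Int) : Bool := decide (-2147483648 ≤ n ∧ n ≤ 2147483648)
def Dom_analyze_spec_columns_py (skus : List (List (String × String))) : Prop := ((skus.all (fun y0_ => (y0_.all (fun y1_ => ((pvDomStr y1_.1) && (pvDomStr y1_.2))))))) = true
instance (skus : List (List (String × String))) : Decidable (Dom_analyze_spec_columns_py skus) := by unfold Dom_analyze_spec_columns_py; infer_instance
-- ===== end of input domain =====

-- B replaces A's set accumulator with sort-then-scan: sort all keys (with duplicates), then one linear pass dropping excluded keys and adjacent duplicates (alternative algorithm, same result).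

-- shared helper: the literal exclusion set both Pythons write out
def pvNonSpecFields : PySem.Set String :=
  PySem.Set.ofList ["code", "price", "stock", "cost", "ot_price", "pic",
                    "weight", "volume", "brokerage", "brokerage_two", "vip_price"]

-- ===== PORT A =====
def analyze_spec_columns_py (skus : List (List (String × String))) : List String :=
  let spec_columns : PySem.Set String :=
    skus.foldl (fun sc sku =>
      (PySem.Dict.keys (PySem.Dict.ofList sku)).foldl (fun sc key =>
        if pvNonSpecFields.contains key then sc else PySem.Set.add sc key) sc)
      PySem.Set.empty
  PySem.List.sorted spec_columns (fun x => x) false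

-- ===== PORT B =====
-- one scan step: append k unless it is excluded or equal to the last output (out[-1])
def pvScanStep (out : List String) (k : String) : List String :=
  if pvNonSpecFields.contains k then out
  else if out.isEmpty || !(out.getLast? == some k) then out ++ [k]
  else out

def analyze_spec_columns_py_alt (skus : List (List (String × String))) : List String :=
  let keys : List String :=
    PySem.List.sorted (skus.flatMap (fun sku => PySem.Dict.keys (PySem.Dict.ofList sku)))
      (fun x => x) false
  keys.foldl pvScanStep []

-- ===== PRECONDITION & SPEC =====
def Spec_analyze_spec_columns_py (skus : List (List (String × String))) (out : List String) : Prop := out = analyze_spec_columns_py_alt skus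
instance (skus : List (List (String × String))) (out : List String) : Decidable (Spec_analyze_spec_columns_py skus out) := by unfold Spec_analyze_spec_columns_py; infer_instance

-- ===== CLAIM (what is proved, stated in full; the proofs are below) =====
def Claim_equal_analyze_spec_columns_py : Prop := ∀ (skus : List (List (String × String))), Dom_analyze_spec_columns_py skus → Spec_analyze_spec_columns_py skus (analyze_spec_columns_py skus)

-- ===== LEMMAS AND PROOFS =====

-- A's inner loop over one sku's keys: membership
theorem pv_mem_inner (ks : List String) (acc : PySem.Set String) (x : String) :
    x ∈ ks.foldl (fun sc key =>
        if pvNonSpecFields.contains key then sc else PySem.Set.add sc key) acc ↔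
      x ∈ acc ∨ (x ∈ ks ∧ x ∉ pvNonSpecFields) := by
  induction ks generalizing acc with
  | nil => simp
  | cons k ks ih =>
    simp only [List.foldl_cons, List.mem_cons]
    by_cases h : k ∈ pvNonSpecFields
    · rw [if_pos ((PySem.Set.contains_iff _ _).mpr h), ih]
      constructor
      · rintro (hx | hx)
        · exact Or.inl hx
        · exact Or.inr ⟨Or.inr hx.1, hx.2⟩
      · rintro (hx | ⟨hx | hx, hn⟩)
        · exact Or.inl hx
        · exact absurd (hx ▸ h) hn
        · exact Or.inr ⟨hx, hn⟩
    · rw [if_neg (fun hc => h ((PySem.Set.contains_iff _ _).mp hc)), ih]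
      simp only [PySem.Set.mem_add]
      constructor
      · rintro ((hx | hx) | hx)
        · exact Or.inl hx
        · exact Or.inr ⟨Or.inl hx, hx ▸ h⟩
        · exact Or.inr ⟨Or.inr hx.1, hx.2⟩
      · rintro (hx | ⟨hx | hx, hn⟩)
        · exact Or.inl (Or.inl hx)
        · exact Or.inl (Or.inr hx)
        · exact Or.inr ⟨hx, hn⟩

-- A's inner loop preserves Nodup
theorem pv_nodup_inner (ks : List String) (acc : PySem.Set String) (h : acc.Nodup) :
    (ks.foldl (fun sc key =>
        if pvNonSpecFields.contains key then sc else PySem.Set.add sc key) acc).Nodup := by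
  induction ks generalizing acc with
  | nil => simpa
  | cons k ks ih =>
    simp only [List.foldl_cons]
    split
    · exact ih acc h
    · exact ih _ (PySem.Set.nodup_add _ _ h)

-- A's outer loop: membership of the accumulated set
theorem pv_mem_foldA (skus : List (List (String × String))) (acc : PySem.Set String) (x : String) :
    x ∈ skus.foldl (fun sc sku =>
        (PySem.Dict.keys (PySem.Dict.ofList sku)).foldl (fun sc key =>
          if pvNonSpecFields.contains key then sc else PySem.Set.add sc key) sc) acc ↔
      x ∈ acc ∨ ((∃ sku ∈ skus, x ∈ PySem.Dict.keys (PySem.Dict.ofList sku)) ∧ x ∉ pvNonSpecFields) := by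
  induction skus generalizing acc with
  | nil => simp
  | cons s ss ih =>
    simp only [List.foldl_cons, ih, pv_mem_inner, List.mem_cons]
    constructor
    · rintro ((hx | hx) | ⟨⟨sku, hs, hks⟩, hn⟩)
      · exact Or.inl hx
      · exact Or.inr ⟨⟨s, Or.inl rfl, hx.1⟩, hx.2⟩
      · exact Or.inr ⟨⟨sku, Or.inr hs, hks⟩, hn⟩
    · rintro (hx | ⟨⟨sku, hs | hs, hks⟩, hn⟩)
      · exact Or.inl (Or.inl hx)
      · exact Or.inl (Or.inr ⟨hs ▸ hks, hn⟩)
      · exact Or.inr ⟨⟨sku, hs, hks⟩, hn⟩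

-- A's outer loop preserves Nodup
theorem pv_nodup_foldA (skus : List (List (String × String))) (acc : PySem.Set String) (h : acc.Nodup) :
    (skus.foldl (fun sc sku =>
        (PySem.Dict.keys (PySem.Dict.ofList sku)).foldl (fun sc key =>
          if pvNonSpecFields.contains key then sc else PySem.Set.add sc key) sc) acc).Nodup := by
  induction skus generalizing acc with
  | nil => simpa
  | cons s ss ih => exact ih _ (pv_nodup_inner _ _ h)

-- in a strictly increasing list, every element is ≤ the last
theorem pv_le_getLast : ∀ (l : List String), l.Pairwise (· < ·) → ∀ a ∈ l,
    ∀ x, l.getLast? = some x → a ≤ x := by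
  intro l
  induction l with
  | nil => intro _ a ha; cases ha
  | cons b t ih =>
    intro hl a ha x hx
    cases t with
    | nil =>
      simp only [List.getLast?_singleton, Option.some.injEq] at hx
      simp only [List.mem_singleton] at ha
      exact le_of_eq (ha.trans hx)
    | cons c t' =>
      rw [List.getLast?_cons_cons] at hx
      rcases List.mem_cons.mp ha with rfl | ha'
      · have hc : a < c := (List.pairwise_cons.mp hl).1 c (List.mem_cons_self)
        have := ih (List.pairwise_cons.mp hl).2 c (List.mem_cons_self) x hx
        exact le_of_lt (lt_of_lt_of_le hc this)
      · exact ih (List.pairwise_cons.mp hl).2 a ha' x hx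

-- the scan over a ≤-sorted list: output is strictly increasing and contains
-- exactly the non-excluded elements (together with the starting accumulator)
theorem pv_scan (L : List String) (out : List String)
    (hL : L.Pairwise (· ≤ ·)) (hout : out.Pairwise (· < ·))
    (hle : ∀ a ∈ out, ∀ b ∈ L, a ≤ b) :
    (L.foldl pvScanStep out).Pairwise (· < ·) ∧
    ∀ x, x ∈ L.foldl pvScanStep out ↔ x ∈ out ∨ (x ∈ L ∧ x ∉ pvNonSpecFields) := by
  induction L generalizing out with
  | nil => exact ⟨hout, by simp⟩
  | cons k L' ih =>
    have hL' : L'.Pairwise (· ≤ ·) := (List.pairwise_cons.mp hL).2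
    have hkL' : ∀ b ∈ L', k ≤ b := (List.pairwise_cons.mp hL).1
    simp only [List.foldl_cons]
    by_cases hkn : k ∈ pvNonSpecFields
    · -- k is excluded: skipped
      have hstep : pvScanStep out k = out := by
        simp only [pvScanStep]
        rw [if_pos ((PySem.Set.contains_iff _ _).mpr hkn)]
      obtain ⟨h1, h2⟩ := ih out hL' hout
        (fun a ha b hb => hle a ha b (List.mem_cons_of_mem _ hb))
      rw [hstep]
      refine ⟨h1, fun x => ?_⟩
      rw [h2 x]
      simp only [List.mem_cons]
      constructor
      · rintro (hx | ⟨hx, hn⟩)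
        · exact Or.inl hx
        · exact Or.inr ⟨Or.inr hx, hn⟩
      · rintro (hx | ⟨rfl | hx, hn⟩)
        · exact Or.inl hx
        · exact absurd hkn hn
        · exact Or.inr ⟨hx, hn⟩
    · have hcf : pvNonSpecFields.contains k = false := by
        rcases h : pvNonSpecFields.contains k with _ | _
        · rfl
        · exact absurd ((PySem.Set.contains_iff _ _).mp h) hkn
      by_cases hlast : out.getLast? = some k
      · -- k equals the last appended element: skipped (already present)
        have hne : out ≠ [] := fun h => by simp [h] at hlast
        have hie : out.isEmpty = false := by simpa [List.isEmpty_iff] using hne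
        have hstep : pvScanStep out k = out := by
          simp only [pvScanStep]
          rw [if_neg (fun h => hkn ((PySem.Set.contains_iff _ _).mp h)), if_neg (by simp [hie, hlast])]
        have hkout : k ∈ out := List.mem_of_getLast? hlast
        obtain ⟨h1, h2⟩ := ih out hL' hout
          (fun a ha b hb => hle a ha b (List.mem_cons_of_mem _ hb))
        rw [hstep]
        refine ⟨h1, fun x => ?_⟩
        rw [h2 x]
        simp only [List.mem_cons]
        constructor
        · rintro (hx | ⟨hx, hn⟩)
          · exact Or.inl hx
          · exact Or.inr ⟨Or.inr hx, hn⟩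
        · rintro (hx | ⟨rfl | hx, hn⟩)
          · exact Or.inl hx
          · exact Or.inl hkout
          · exact Or.inr ⟨hx, hn⟩
      · -- k is appended
        have hstep : pvScanStep out k = out ++ [k] := by
          simp only [pvScanStep]
          rw [if_neg (fun h => hkn ((PySem.Set.contains_iff _ _).mp h)), if_pos (by simp [hlast])]
        have hlt : ∀ a ∈ out, a < k := by
          intro a ha
          rcases hl : out.getLast? with _ | x
          · rcases out with _ | ⟨y, t⟩
            · cases ha
            · simp [List.getLast?_eq_none_iff] at hl
          · have hax : a ≤ x := pv_le_getLast out hout a ha x hl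
            have hxk : x ≤ k := hle x (List.mem_of_getLast? hl) k List.mem_cons_self
            have hxk' : x ≠ k := fun h => hlast (hl.trans (by rw [h]))
            exact lt_of_le_of_lt hax (lt_of_le_of_ne hxk hxk')
        have hout' : (out ++ [k]).Pairwise (· < ·) := by
          rw [List.pairwise_append]
          exact ⟨hout, List.pairwise_singleton _ _, fun a ha b hb => by
            rw [List.mem_singleton] at hb; exact hb ▸ hlt a ha⟩
        have hle' : ∀ a ∈ out ++ [k], ∀ b ∈ L', a ≤ b := by
          intro a ha b hb
          rcases List.mem_append.mp ha with ha' | ha'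
          · exact hle a ha' b (List.mem_cons_of_mem _ hb)
          · rw [List.mem_singleton] at ha'; exact ha' ▸ hkL' b hb
        obtain ⟨h1, h2⟩ := ih (out ++ [k]) hL' hout' hle'
        rw [hstep]
        refine ⟨h1, fun x => ?_⟩
        rw [h2 x]
        simp only [List.mem_append, List.mem_cons, List.not_mem_nil, or_false]
        constructor
        · rintro ((hx | rfl) | ⟨hx, hn⟩)
          · exact Or.inl hx
          · exact Or.inr ⟨Or.inl rfl, hkn⟩
          · exact Or.inr ⟨Or.inr hx, hn⟩
        · rintro (hx | ⟨rfl | hx, hn⟩)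
          · exact Or.inl (Or.inl hx)
          · exact Or.inl (Or.inr rfl)
          · exact Or.inr ⟨hx, hn⟩

-- ===== VERDICT (by name: the statement is the Claim_ definition above) =====
theorem analyze_spec_columns_py_spec : Claim_equal_analyze_spec_columns_py := by
  intro skus _
  unfold Spec_analyze_spec_columns_py
  show analyze_spec_columns_py skus = analyze_spec_columns_py_alt skus
  have hA : analyze_spec_columns_py skus =
      PySem.List.sorted
        (skus.foldl (fun sc sku =>
          (PySem.Dict.keys (PySem.Dict.ofList sku)).foldl (fun sc key =>
            if pvNonSpecFields.contains key then sc else PySem.Set.add sc key) sc)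
          PySem.Set.empty) (fun x => x) false := rfl
  have hB : analyze_spec_columns_py_alt skus =
      (PySem.List.sorted (skus.flatMap (fun sku => PySem.Dict.keys (PySem.Dict.ofList sku)))
        (fun x => x) false).foldl pvScanStep [] := rfl
  rw [hA, hB]
  set allk := skus.flatMap (fun sku => PySem.Dict.keys (PySem.Dict.ofList sku)) with hallk
  have hLpair : (PySem.List.sorted allk (fun x => x) false).Pairwise (· ≤ ·) := by
    simpa using PySem.List.sorted_pairwise allk (fun x => x)
  obtain ⟨hpair, hmem⟩ := pv_scan (PySem.List.sorted allk (fun x => x) false) []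
    hLpair List.Pairwise.nil (by simp)
  apply PySem.List.sorted_eq_of_perm_of_pairwise_lt
  · -- the scan output is a permutation of A's accumulated set
    apply (List.perm_ext_iff_of_nodup (hpair.imp ne_of_lt)
      (pv_nodup_foldA skus PySem.Set.empty (by simp [PySem.Set.empty]))).mpr
    intro x
    rw [hmem x, pv_mem_foldA]
    rw [PySem.List.mem_sorted, hallk, List.mem_flatMap]
    simp [PySem.Set.empty]
  · simpa using hpair
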